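-- pv_equiv track=rewrite | github.com/Haizard/binance-bot | app.py | calculate_recovery_time
-- ===== SOURCE A (Python) =====
-- def calculate_recovery_time(drawdowns):
--     """Helper function to calculate recovery time"""
--     if not drawdowns:
--         return '0d'
--
--     current_drawdown = 0
--     max_recovery_time = 0
--     current_recovery_time = 0
--
--     for dd in drawdowns:
--         if dd > 0:
--             current_drawdown = dd
--             current_recovery_time += 1
--         else:
--             if current_drawdown > 0:
--                 max_recovery_time = max(max_recovery_time, current_recovery_time)
--             current_drawdown = 0
--             current_recovery_time = 0
--
--     return f"{max_recovery_time}d"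
-- ===== SOURCE B (Python) =====
-- def calculate_recovery_time(drawdowns):
--     """Helper function to calculate recovery time"""
--     if not drawdowns:
--         return '0d'
--
--     n = len(drawdowns)
--     m = 0
--     pos = 0
--     while pos < n:
--         # measure the maximal positive run starting at pos
--         i = pos
--         while i < n and drawdowns[i] > 0:
--             i += 1
--         if i == n:
--             break  # a trailing positive run is never terminated, so it does not count
--         m = max(m, i - pos)
--         pos = i + 1  # skip the terminating non-positive element
--     return f"{m}d"
-- ===== Notes on version B (the rewrite author's own statement) =====
-- stated objective: alternative
-- what changed: Replaces A's single-pass three-variable accumulator (current_drawdown/max/current counters updated per element) by a run-splitting decomposition: an outer loop over maximal positive runs that measures each leading run with an inner scan, stops at a trailing unterminated run, and keeps the max of terminated run lengths.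
import Mathlib
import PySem

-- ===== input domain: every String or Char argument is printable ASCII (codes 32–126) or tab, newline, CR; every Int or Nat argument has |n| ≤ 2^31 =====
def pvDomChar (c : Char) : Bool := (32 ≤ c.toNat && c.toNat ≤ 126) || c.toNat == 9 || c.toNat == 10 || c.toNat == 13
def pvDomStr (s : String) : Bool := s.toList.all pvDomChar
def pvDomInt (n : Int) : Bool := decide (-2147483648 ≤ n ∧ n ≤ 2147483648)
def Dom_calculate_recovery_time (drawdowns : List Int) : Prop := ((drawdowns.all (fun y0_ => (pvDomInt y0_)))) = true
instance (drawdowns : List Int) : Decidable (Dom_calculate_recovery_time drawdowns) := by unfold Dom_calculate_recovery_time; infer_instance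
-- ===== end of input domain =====

-- B re-implements A by recursive run-splitting instead of A's accumulator loop (objective: alternative decomposition).
-- ===== PORT A =====
def calcA_loop : List Int → Int → Nat → Nat → Nat
  | [], _, mx, _ => mx
  | dd :: rest, cd, mx, cr =>
      if dd > 0 then calcA_loop rest dd mx (cr + 1)
      else calcA_loop rest 0 (if cd > 0 then Nat.max mx cr else mx) 0

def calculate_recovery_time (drawdowns : List Int) : String :=
  if drawdowns = [] then "0d"
  else PySem.Int.toStr (Int.ofNat (calcA_loop drawdowns 0 0 0)) ++ "d"

-- ===== PORT B =====
-- termination helper for bestB_loop (cited by name in its decreasing_by)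
theorem takeWhile_len_le (p : Int → Bool) (xs : List Int) : (xs.takeWhile p).length ≤ xs.length := by
  induction xs with
  | nil => simp
  | cons a l ih => simp only [List.takeWhile_cons]; split
                   · simpa using ih
                   · simp

-- the outer while loop of B: `xs` is the suffix starting at `pos`, `m` the running max;
-- the inner while loop (count the leading positive run) is the takeWhile length
def bestB_loop (xs : List Int) (m : Nat) : Nat :=
  let i := (xs.takeWhile (fun x => decide (x > 0))).length
  if h : i = xs.length then m
  else bestB_loop (xs.drop (i + 1)) (Nat.max m i)
termination_by xs.length
decreasing_by
  have hle := takeWhile_len_le (fun x => decide (x > 0)) xs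
  simp only [List.length_drop]
  omega

def calculate_recovery_time_alt (drawdowns : List Int) : String :=
  if drawdowns = [] then "0d"
  else PySem.Int.toStr (Int.ofNat (bestB_loop drawdowns 0)) ++ "d"

-- ===== PRECONDITION & SPEC =====
def Spec_calculate_recovery_time (drawdowns : List Int) (out : String) : Prop := out = calculate_recovery_time_alt drawdowns
instance (drawdowns : List Int) (out : String) : Decidable (Spec_calculate_recovery_time drawdowns out) := by unfold Spec_calculate_recovery_time; infer_instance

-- ===== CLAIM (what is proved, stated in full; the proofs are below) =====
def Claim_equal_calculate_recovery_time : Prop := ∀ (drawdowns : List Int), Dom_calculate_recovery_time drawdowns → Spec_calculate_recovery_time drawdowns (calculate_recovery_time drawdowns)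

-- ===== LEMMAS AND PROOFS =====

-- abbreviation used only in the proofs: length of the leading positive run
def leadPos (xs : List Int) : Nat := (xs.takeWhile (fun x => decide (x > 0))).length

theorem bestB_loop_eq (xs : List Int) (m : Nat) :
    bestB_loop xs m = if leadPos xs = xs.length then m
                      else bestB_loop (xs.drop (leadPos xs + 1)) (Nat.max m (leadPos xs)) := by
  rw [bestB_loop]
  rfl

theorem calcA_main (xs : List Int) :
    (∀ mx, calcA_loop xs 0 mx 0 = bestB_loop xs mx) ∧
    (∀ (cd : Int) mx cr, 0 < cd →
      calcA_loop xs cd mx cr =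
        if leadPos xs = xs.length then mx
        else bestB_loop (xs.drop (leadPos xs + 1)) (Nat.max mx (cr + leadPos xs))) := by
  induction xs with
  | nil =>
      constructor
      · intro mx
        rw [bestB_loop_eq]
        simp [calcA_loop, leadPos]
      · intro cd mx cr hcd
        simp [calcA_loop, leadPos]
  | cons d rest ih =>
      obtain ⟨ihA, ihB⟩ := ih
      have hlead_pos : d > 0 → leadPos (d :: rest) = leadPos rest + 1 := by
        intro hd
        simp [leadPos, List.takeWhile_cons, hd]
      have hlead_neg : ¬ d > 0 → leadPos (d :: rest) = 0 := by
        intro hd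
        simp [leadPos, List.takeWhile_cons, hd]
      have hdropP : (d :: rest).drop (leadPos rest + 1 + 1) = rest.drop (leadPos rest + 1) := by
        simp [List.drop_succ_cons]
      constructor
      · intro mx
        by_cases hd : d > 0
        · have h1 : calcA_loop (d :: rest) 0 mx 0 = calcA_loop rest d mx 1 := by
            simp [calcA_loop, hd]
          rw [h1, ihB d mx 1 hd, bestB_loop_eq (d :: rest) mx, hlead_pos hd]
          by_cases hc : leadPos rest = rest.length
          · simp [hc]
          · have hc' : ¬ (leadPos rest + 1 = (d :: rest).length) := by
              simp only [List.length_cons]; omega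
            simp only [hc, hc', if_false]
            rw [hdropP, Nat.add_comm 1 (leadPos rest)]
        · have h1 : calcA_loop (d :: rest) 0 mx 0 = calcA_loop rest 0 mx 0 := by
            simp [calcA_loop, hd]
          rw [h1, ihA mx, bestB_loop_eq (d :: rest) mx, hlead_neg hd]
          have hc' : ¬ ((0 : Nat) = (d :: rest).length) := by simp
          simp only [hc', if_false]
          have hdrop : (d :: rest).drop (0 + 1) = rest := by simp
          rw [hdrop]
          simp
      · intro cd mx cr hcd
        by_cases hd : d > 0
        · have h1 : calcA_loop (d :: rest) cd mx cr = calcA_loop rest d mx (cr + 1) := by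
            simp [calcA_loop, hd]
          rw [h1, ihB d mx (cr + 1) hd, hlead_pos hd]
          by_cases hc : leadPos rest = rest.length
          · have hcl : leadPos rest + 1 = (d :: rest).length := by simp [hc]
            simp [hc, hcl]
          · have hc' : ¬ (leadPos rest + 1 = (d :: rest).length) := by
              simp only [List.length_cons]; omega
            simp only [hc, hc', if_false]
            have harith : cr + 1 + leadPos rest = cr + (leadPos rest + 1) := by omega
            rw [hdropP, harith]
        · have h1 : calcA_loop (d :: rest) cd mx cr = calcA_loop rest 0 (Nat.max mx cr) 0 := by
            simp [calcA_loop, hd, hcd]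
          rw [h1, ihA (Nat.max mx cr), hlead_neg hd]
          have hc' : ¬ ((0 : Nat) = (d :: rest).length) := by simp
          simp only [hc', if_false]
          have hdrop : (d :: rest).drop (0 + 1) = rest := by simp
          rw [hdrop]
          simp

-- ===== VERDICT (by name: the statement is the Claim_ definition above) =====
theorem calculate_recovery_time_spec : Claim_equal_calculate_recovery_time := by
  intro xs _
  unfold Spec_calculate_recovery_time calculate_recovery_time calculate_recovery_time_alt
  by_cases hx : xs = []
  · simp [hx]
  · simp only [hx, if_false]
    rw [(calcA_main xs).1 0]
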